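-- pv_equiv track=rewrite | github.com/YeralCode/ExcelSiorBackend | repository/proyectos/processor_factory.py | preprocess_line
-- ===== SOURCE A (Python) =====
-- def preprocess_line(line: str) -> str:
--     """Preprocesa línea para manejar comas y saltos internos."""
--     if not line.strip():
--         return line
--
--     temp_newline = '⏎'
--     temp_comma = '\uE000'
--
--     line = line.replace('\\n', temp_newline)
--     in_quotes = False
--     processed = []
--
--     for char in line:
--         if char == '"':
--             in_quotes = not in_quotes
--             processed.append(char)
--         elif char == ',' and not in_quotes:
--             processed.append(temp_comma)
--         else:
--             processed.append(char)
--
--     return ''.join(processed)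
-- ===== SOURCE B (Python) =====
-- def preprocess_line(line: str) -> str:
--     """Preprocesa línea para manejar comas y saltos internos."""
--     if not line.strip():
--         return line
--
--     temp_newline = '⏎'
--     temp_comma = '\uE000'
--
--     line = line.replace('\\n', temp_newline)
--     parts = line.split('"')
--     return '"'.join(p.replace(',', temp_comma) if i % 2 == 0 else p
--                     for i, p in enumerate(parts))
-- ===== Notes on version B (the rewrite author's own statement) =====
-- stated objective: simpler
-- what changed: The per-character in_quotes toggle loop is replaced by splitting the line at quote characters, replacing commas only in the even-indexed (outside-quotes) segments, and rejoining; the segment operations run in C built-ins, a constant-factor speedup.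
import Mathlib
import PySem

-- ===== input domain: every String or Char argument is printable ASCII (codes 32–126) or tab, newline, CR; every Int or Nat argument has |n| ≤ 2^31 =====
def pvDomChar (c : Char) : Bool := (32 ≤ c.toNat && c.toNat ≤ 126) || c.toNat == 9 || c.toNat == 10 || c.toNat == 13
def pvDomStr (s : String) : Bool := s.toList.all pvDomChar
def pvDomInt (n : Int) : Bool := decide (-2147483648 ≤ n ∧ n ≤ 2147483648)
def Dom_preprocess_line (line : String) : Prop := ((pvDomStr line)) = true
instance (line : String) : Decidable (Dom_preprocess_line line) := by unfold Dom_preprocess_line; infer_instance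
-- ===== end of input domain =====

-- B replaces the per-character in_quotes toggle loop by split-at-quotes / replace commas in even segments / rejoin (simpler; measured faster by constant factor via C built-ins).

-- ===== PORT A =====
def preprocess_line (line : String) : String :=
  if PySem.Str.strip line = "" then line
  else
    let l := PySem.Str.replace line "\\n" "⏎"
    let res := l.toList.foldl
      (fun (st : Bool × List Char) ch =>
        if ch == '"' then (!st.1, st.2 ++ [ch])
        else if ch == ',' && !st.1 then (st.1, st.2 ++ ['\uE000'])
        else (st.1, st.2 ++ [ch])) (false, [])
    String.mk res.2

-- ===== PORT B =====
def preprocess_line_alt (line : String) : String :=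
  if PySem.Str.strip line = "" then line
  else
    let l := PySem.Str.replace line "\\n" "⏎"
    let parts := PySem.Chars.splitOn l.toList ['"']
    String.mk (PySem.Chars.join ['"']
      ((PySem.List.enumerate parts).map
        (fun p => if p.1 % 2 == 0 then PySem.Chars.replace p.2 [','] ['\uE000'] else p.2)))

-- ===== PRECONDITION & SPEC =====
def Spec_preprocess_line (line : String) (out : String) : Prop := out = preprocess_line_alt line
instance (line : String) (out : String) : Decidable (Spec_preprocess_line line out) := by unfold Spec_preprocess_line; infer_instance

-- ===== CLAIM (what is proved, stated in full; the proofs are below) =====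
def Claim_equal_preprocess_line : Prop := ∀ (line : String), Dom_preprocess_line line → Spec_preprocess_line line (preprocess_line line)

-- ===== LEMMAS AND PROOFS =====

/-- Single-character comma replacement, as a map. -/
def pvRepl (c : Char) : Char := if c == ',' then '\uE000' else c

/-- Recursive split on '"'. -/
def pvQsplit : List Char → List (List Char)
  | [] => [[]]
  | c :: rest =>
    if c == '"' then [] :: pvQsplit rest
    else
      match pvQsplit rest with
      | [] => [[c]]
      | s :: ss => (c :: s) :: ss

/-- Alternate map: replace commas in segments where the flag is false. -/
def pvAltMap : Bool → List (List Char) → List (List Char)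
  | _, [] => []
  | q, s :: ss => (if q then s else s.map pvRepl) :: pvAltMap (!q) ss

theorem pvQsplit_ne_nil (cs : List Char) : pvQsplit cs ≠ [] := by
  cases cs with
  | nil => simp [pvQsplit]
  | cons c rest =>
    simp only [pvQsplit]
    split
    · simp
    · split <;> simp

theorem pvReplace_go (fuel : Nat) : ∀ (l acc : List Char), l.length ≤ fuel →
    PySem.Chars.replace.go [','] ['\uE000'] fuel l acc = acc.reverse ++ l.map pvRepl := by
  induction fuel with
  | zero =>
    intro l acc h
    have : l = [] := by cases l <;> simp_all
    subst this
    simp [PySem.Chars.replace.go]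
  | succ n ih =>
    intro l acc h
    cases l with
    | nil => simp [PySem.Chars.replace.go]
    | cons c t =>
      simp only [PySem.Chars.replace.go]
      by_cases hc : c = ','
      · subst hc
        simp only [List.isPrefixOf, BEq.rfl, Bool.true_and, List.isPrefixOf_nil_left, if_pos]
        have hd : List.drop ([','] : List Char).length (',' :: t) = t := rfl
        rw [hd, ih t _ (by simpa using Nat.le_of_succ_le_succ h)]
        simp [pvRepl]
      · have hp : [','].isPrefixOf (c :: t) = false := by
          simp [List.isPrefixOf, hc]
          intro h'; exact absurd h'.symm hc
        rw [hp]
        simp only [Bool.false_eq_true, if_false]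
        rw [ih t _ (by simpa using Nat.le_of_succ_le_succ h)]
        simp [pvRepl, hc]

theorem pvReplace_comma (l : List Char) :
    PySem.Chars.replace l [','] ['\uE000'] = l.map pvRepl := by
  have : ([','] : List Char).isEmpty = false := by decide
  simp only [PySem.Chars.replace, this, Bool.false_eq_true, if_false]
  simpa using pvReplace_go l.length l [] (le_refl _)

theorem pvSplitOn_go (fuel : Nat) : ∀ (l cur : List Char) (acc : List (List Char)), l.length ≤ fuel →
    PySem.Chars.splitOn.go ['"'] fuel l cur acc
      = acc.reverse ++ (pvQsplit l).modifyHead (cur.reverse ++ ·) := by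
  induction fuel with
  | zero =>
    intro l cur acc h
    have : l = [] := by cases l <;> simp_all
    subst this
    simp [PySem.Chars.splitOn.go, pvQsplit]
  | succ n ih =>
    intro l cur acc h
    cases l with
    | nil => simp [PySem.Chars.splitOn.go, pvQsplit]
    | cons c t =>
      simp only [PySem.Chars.splitOn.go]
      by_cases hc : c = '"'
      · subst hc
        simp only [List.isPrefixOf, BEq.rfl, Bool.true_and, List.isPrefixOf_nil_left, if_pos]
        have hd : List.drop (['"'] : List Char).length ('"' :: t) = t := rfl
        rw [hd, ih t [] _ (by simpa using Nat.le_of_succ_le_succ h)]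
        cases ht : pvQsplit t with
        | nil => exact absurd ht (pvQsplit_ne_nil t)
        | cons s ss => simp [pvQsplit, ht]
      · have hp : ['"'].isPrefixOf (c :: t) = false := by
          simp [List.isPrefixOf]
          intro h'; exact absurd h'.symm hc
        rw [hp]
        simp only [Bool.false_eq_true, if_false]
        rw [ih t (c :: cur) acc (by simpa using Nat.le_of_succ_le_succ h)]
        have hcb : (c == '"') = false := by simpa using hc
        have hq : pvQsplit (c :: t) = (pvQsplit t).modifyHead (c :: ·) := by
          simp only [pvQsplit, hcb, Bool.false_eq_true, if_false]
          cases ht : pvQsplit t with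
          | nil => exact absurd ht (pvQsplit_ne_nil t)
          | cons s ss => simp
        rw [hq]
        cases ht : pvQsplit t with
        | nil => exact absurd ht (pvQsplit_ne_nil t)
        | cons s ss => simp

theorem pvSplitOn_eq (cs : List Char) : PySem.Chars.splitOn cs ['"'] = pvQsplit cs := by
  simp only [PySem.Chars.splitOn]
  rw [pvSplitOn_go (cs.length + 1) cs [] [] (Nat.le_succ _)]
  cases h : pvQsplit cs with
  | nil => exact absurd h (pvQsplit_ne_nil cs)
  | cons s ss => simp

theorem pvEnum_alt (ss : List (List Char)) : ∀ (k : Int),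
    (PySem.List.enumerate ss k).map
        (fun p => if p.1 % 2 == 0 then PySem.Chars.replace p.2 [','] ['\uE000'] else p.2)
      = pvAltMap (!(k % 2 == 0)) ss := by
  induction ss with
  | nil => intro k; simp [PySem.List.enumerate, pvAltMap]
  | cons s rest ih =>
    intro k
    have hpar : ((k + 1) % 2 == 0) = !(k % 2 == 0) := by
      rcases Int.emod_two_eq k with h | h
      · have h1 : (k + 1) % 2 = 1 := by omega
        rw [h, h1]; decide
      · have h1 : (k + 1) % 2 = 0 := by omega
        rw [h, h1]; decide
    simp only [PySem.List.enumerate, List.map_cons, ih (k + 1), hpar, Bool.not_not, pvAltMap]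
    cases hb : (k % 2 == 0) <;> simp [hb, pvReplace_comma]

theorem pvJoin_cons_head (a : Char) (x : List Char) (ss : List (List Char)) :
    PySem.Chars.join ['"'] ((a :: x) :: ss) = a :: PySem.Chars.join ['"'] (x :: ss) := by
  cases ss with
  | nil => simp [PySem.Chars.join_singleton]
  | cons y t => rw [PySem.Chars.join_cons_cons, PySem.Chars.join_cons_cons]; simp

theorem pvFoldA (cs : List Char) : ∀ (q : Bool) (acc : List Char),
    (cs.foldl
      (fun (st : Bool × List Char) ch =>
        if ch == '"' then (!st.1, st.2 ++ [ch])
        else if ch == ',' && !st.1 then (st.1, st.2 ++ ['\uE000'])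
        else (st.1, st.2 ++ [ch])) (q, acc)).2
      = acc ++ PySem.Chars.join ['"'] (pvAltMap q (pvQsplit cs)) := by
  induction cs with
  | nil =>
    intro q acc
    cases q <;> simp [pvQsplit, pvAltMap, PySem.Chars.join_singleton]
  | cons c rest ih =>
    intro q acc
    by_cases hc : c = '"'
    · subst hc
      simp only [List.foldl_cons, BEq.rfl, if_pos]
      rw [ih (!q) (acc ++ ['"'])]
      have hq : pvQsplit ('"' :: rest) = [] :: pvQsplit rest := by simp [pvQsplit]
      rw [hq]
      simp only [pvAltMap]
      cases hr : pvQsplit rest with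
      | nil => exact absurd hr (pvQsplit_ne_nil rest)
      | cons s ss =>
        simp only [pvAltMap]
        rw [PySem.Chars.join_cons_cons]
        cases q <;> simp [pvAltMap]
    · have hcb : (c == '"') = false := by simpa using hc
      obtain ⟨s, ss, hr⟩ : ∃ s ss, pvQsplit rest = s :: ss := by
        cases h : pvQsplit rest with
        | nil => exact absurd h (pvQsplit_ne_nil rest)
        | cons s ss => exact ⟨s, ss, rfl⟩
      have hq : pvQsplit (c :: rest) = (c :: s) :: ss := by
        simp [pvQsplit, hc, hr]
      simp only [List.foldl_cons, hcb, Bool.false_eq_true, if_false]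
      rw [hq]
      by_cases hq' : q = true
      · subst hq'
        simp only [Bool.not_true, Bool.and_false, Bool.false_eq_true, if_false]
        rw [ih true (acc ++ [c]), hr]
        simp only [pvAltMap, if_pos]
        rw [pvJoin_cons_head]
        simp
      · have : q = false := by simpa using hq'
        subst this
        simp only [Bool.not_false, Bool.and_true]
        rw [hr] at ih
        by_cases hcm : c = ','
        · subst hcm
          simp only [BEq.rfl, if_pos]
          rw [ih false (acc ++ ['\uE000'])]
          simp only [pvAltMap, Bool.not_false, List.map_cons, Bool.false_eq_true, if_false]
          rw [pvJoin_cons_head]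
          simp [pvRepl]
        · have hcmb : (c == ',') = false := by simpa using hcm
          simp only [hcmb, Bool.false_eq_true, if_false]
          rw [ih false (acc ++ [c])]
          simp only [pvAltMap, Bool.not_false, List.map_cons, Bool.false_eq_true, if_false]
          rw [pvJoin_cons_head]
          simp [pvRepl, hcmb]

-- ===== VERDICT (by name: the statement is the Claim_ definition above) =====
theorem preprocess_line_spec : Claim_equal_preprocess_line := by
  intro line _
  unfold Spec_preprocess_line preprocess_line preprocess_line_alt
  by_cases h : PySem.Str.strip line = ""
  · simp [h]
  · simp only [h, if_false]
    rw [pvSplitOn_eq, pvEnum_alt]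
    rw [pvFoldA _ false []]
    norm_num
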